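-- pv_equiv track=rewrite | github.com/nels2248/congress | cluster_topics.py | chamber_breakdown
-- ===== SOURCE A (Python) =====
-- from collections import defaultdict
--
-- def chamber_breakdown(bills, labels):
--     breakdown = defaultdict(lambda: defaultdict(int))
--     for bill, label in zip(bills, labels):
--         if label == -1:
--             continue
--         chamber = bill.get("origin_chamber") or "Unknown"
--         breakdown[int(label)][chamber] += 1
--     return {k: dict(v) for k, v in breakdown.items()}
-- ===== SOURCE B (Python) =====
-- def chamber_breakdown(bills, labels):
--     pairs = [(int(label), bill.get("origin_chamber") or "Unknown")
--              for bill, label in zip(bills, labels) if label != -1]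
--     result = {}
--     for l in dict.fromkeys(k for k, _ in pairs):
--         chambers = [c for k, c in pairs if k == l]
--         result[l] = {c: chambers.count(c) for c in dict.fromkeys(chambers)}
--     return result
-- ===== Notes on version B (the rewrite author's own statement) =====
-- stated objective: alternative
-- what changed: A counts incrementally in one pass into a nested defaultdict of int counters; B never increments anything: it materialises the (label, chamber) pair list, takes the first-occurrence-ordered distinct labels with dict.fromkeys, and for each label filters the pairs and counts each distinct chamber with list.count.
import Mathlib
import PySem

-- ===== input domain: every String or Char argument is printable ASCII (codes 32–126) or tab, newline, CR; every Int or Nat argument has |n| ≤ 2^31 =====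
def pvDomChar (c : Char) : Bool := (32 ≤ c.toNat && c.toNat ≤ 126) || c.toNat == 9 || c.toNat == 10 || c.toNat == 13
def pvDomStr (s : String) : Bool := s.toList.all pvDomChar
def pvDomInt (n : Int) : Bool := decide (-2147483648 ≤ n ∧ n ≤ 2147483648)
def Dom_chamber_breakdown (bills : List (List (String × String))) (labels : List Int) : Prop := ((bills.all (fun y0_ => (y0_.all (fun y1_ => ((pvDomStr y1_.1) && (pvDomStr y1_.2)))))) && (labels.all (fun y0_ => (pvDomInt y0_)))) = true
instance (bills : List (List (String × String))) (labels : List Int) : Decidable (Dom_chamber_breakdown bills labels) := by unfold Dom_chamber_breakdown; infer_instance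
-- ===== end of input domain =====

-- B replaces A's one-pass incremental nested defaultdict counting by a pair list, a dedup of
-- the labels, and per-label filter + list.count scans; objective: alternative (not faster).

-- ===== PORT A =====
-- bill.get("origin_chamber") or "Unknown": first-match lookup in the assoc list; None and "" are falsy
def pvChamber (bill : List (String × String)) : String :=
  match (bill.find? (fun kv => kv.1 == "origin_chamber")).map (·.2) with
  | none => "Unknown"
  | some s => if s == "" then "Unknown" else s

-- breakdown: the defaultdict-of-defaultdict loop; the final line is A's {k: dict(v) …} comprehension
def chamber_breakdown (bills : List (List (String × String))) (labels : List Int) : List (Int × List (String × Int)) :=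
  ((bills.zip labels).foldl
      (fun d q =>
        if q.2 == -1 then d
        else d.modify q.2 PySem.Dict.empty (fun inner => inner.modify (pvChamber q.1) 0 (· + 1)))
      (PySem.Dict.empty : PySem.Dict Int (PySem.Dict String Int))).items.map
    (fun g => (g.1, g.2.items))

-- ===== PORT B =====
-- pairs comprehension; loop over dict.fromkeys of the labels; per label the chambers
-- comprehension and the {c: chambers.count(c) for c in dict.fromkeys(chambers)} inner dict
def chamber_breakdown_alt (bills : List (List (String × String))) (labels : List Int) : List (Int × List (String × Int)) :=
  let pairs := (((bills.zip labels).filter (fun q => !(q.2 == -1))).map (fun q => (q.2, pvChamber q.1)))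
  (PySem.List.dedup (pairs.map (fun p => p.1))).map (fun l =>
    let chambers := (pairs.filter (fun p => p.1 == l)).map (fun p => p.2)
    (l, (PySem.List.dedup chambers).map (fun c => (c, (chambers.count c : Int)))))

-- ===== PRECONDITION & SPEC =====
def Spec_chamber_breakdown (bills : List (List (String × String))) (labels : List Int) (out : List (Int × List (String × Int))) : Prop := out = chamber_breakdown_alt bills labels
instance (bills : List (List (String × String))) (labels : List Int) (out : List (Int × List (String × Int))) : Decidable (Spec_chamber_breakdown bills labels out) := by unfold Spec_chamber_breakdown; infer_instance

-- ===== CLAIM (what is proved, stated in full; the proofs are below) =====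
def Claim_equal_chamber_breakdown : Prop := ∀ (bills : List (List (String × String))) (labels : List Int), Dom_chamber_breakdown bills labels → Spec_chamber_breakdown bills labels (chamber_breakdown bills labels)

-- ===== LEMMAS AND PROOFS =====

-- A's nested incremental counter over a pair list equals the group-then-count dictionary.
lemma pv_main (ps : List (Int × String)) :
    ps.foldl (fun d p => d.modify p.1 PySem.Dict.empty (fun inner => inner.modify p.2 0 (· + 1)))
      PySem.Dict.empty
    = PySem.Dict.mk
        (((ps.foldl (fun d p => d.modify p.1 [] (fun chs => chs ++ [p.2])) PySem.Dict.empty).items).map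
          (fun g => (g.1, PySem.Dict.counter g.2))) := by
  induction ps using List.reverseRecOn with
  | nil => rfl
  | append_singleton ps p ih =>
    simp only [List.foldl_append, List.foldl_cons, List.foldl_nil]
    rw [ih]
    set G := ps.foldl (fun d p => d.modify p.1 [] (fun chs => chs ++ [p.2])) PySem.Dict.empty
    set N := PySem.Dict.mk (G.items.map (fun g => (g.1, PySem.Dict.counter g.2))) with hN
    have hnodG : G.keys.Nodup := by
      exact PySem.Dict.nodup_keys_foldl_modify_key ps (fun p => p.1) [] (fun _ p chs => chs ++ [p.2])
        PySem.Dict.empty (by exact PySem.Dict.nodup_keys_empty)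
    have hkeys : N.keys = G.keys := by
      simp [hN, PySem.Dict.keys, List.map_map, Function.comp]
    have hcont : N.contains p.1 = G.contains p.1 := by
      rw [hN]
      simp only [PySem.Dict.contains, List.any_map]
      rfl
    simp only [PySem.Dict.modify]
    cases hc : G.contains p.1 with
    | true =>
      have hcN : N.contains p.1 = true := by rw [hcont, hc]
      cases hg : G.get? p.1 with
      | none => rw [PySem.Dict.get?_eq_none_iff_contains] at hg; rw [hg] at hc; cases hc
      | some chs =>
        have hmem : (p.1, chs) ∈ G.items := PySem.Dict.mem_items_of_get?_eq_some G hg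
        have hFm : (p.1, PySem.Dict.counter chs) ∈ N.items := by
          rw [hN]; exact List.mem_map_of_mem hmem
        have hnodN : N.keys.Nodup := by rw [hkeys]; exact hnodG
        have hgetN : N.getD p.1 PySem.Dict.empty = PySem.Dict.counter chs :=
          PySem.Dict.getD_of_mem_items N hFm hnodN _
        have hgetG : G.getD p.1 [] = chs := by simp [PySem.Dict.getD, hg]
        apply PySem.Dict.ext
        rw [PySem.Dict.items_insert_of_contains N _ hcN, PySem.Dict.items_insert_of_contains G _ hc]
        rw [hN]
        simp only [List.map_map]
        apply List.map_congr_left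
        intro g hgm
        by_cases h : g.1 = p.1
        · rw [hN] at hgetN
          simp [Function.comp, h, hgetN, hgetG, PySem.Dict.counter_append_singleton,
            PySem.Dict.modify]
        · simp [Function.comp, h]
    | false =>
      have hcN : N.contains p.1 = false := by rw [hcont, hc]
      have hgetN : N.getD p.1 PySem.Dict.empty = PySem.Dict.empty :=
        PySem.Dict.getD_of_not_contains N _ hcN
      have hgetG : G.getD p.1 [] = [] := PySem.Dict.getD_of_not_contains G _ hc
      apply PySem.Dict.ext
      rw [PySem.Dict.items_insert_of_not_contains N _ hcN, PySem.Dict.items_insert_of_not_contains G _ hc]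
      rw [hN, hgetN, hgetG]
      simp only [List.map_append, List.map_cons, List.map_nil]
      rfl

theorem chamber_breakdown_spec : Claim_equal_chamber_breakdown := by
  intro bills labels _
  unfold Spec_chamber_breakdown chamber_breakdown chamber_breakdown_alt
  set pairs := (((bills.zip labels).filter (fun q => !(q.2 == -1))).map (fun q => (q.2, pvChamber q.1))) with hpairs
  have hstep : (bills.zip labels).foldl
      (fun d q => if q.2 == -1 then d
        else d.modify q.2 PySem.Dict.empty (fun inner => inner.modify (pvChamber q.1) 0 (· + 1)))
      (PySem.Dict.empty : PySem.Dict Int (PySem.Dict String Int))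
    = pairs.foldl
        (fun d p => d.modify p.1 PySem.Dict.empty (fun inner => inner.modify p.2 0 (· + 1)))
        PySem.Dict.empty := by
    rw [hpairs, List.foldl_map, ← PySem.List.foldl_if_eq_foldl_filter (p := fun (q : List (String × String) × Int) => !(q.2 == -1))]
    apply PySem.List.foldl_congr_mem
    intro acc x _
    cases h : x.2 == -1 <;> simp
  rw [hstep, pv_main]
  set G := pairs.foldl (fun d p => d.modify p.1 [] (fun chs => chs ++ [p.2])) PySem.Dict.empty with hG
  have hnodG : G.keys.Nodup :=
    PySem.Dict.nodup_keys_foldl_modify_key pairs (fun p => p.1) [] (fun _ p chs => chs ++ [p.2])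
      PySem.Dict.empty PySem.Dict.nodup_keys_empty
  have hkeysG : G.keys = PySem.List.dedup (pairs.map (fun p => p.1)) := by
    rw [hG, PySem.Dict.keys_foldl_modify_key, PySem.Dict.keys_empty, PySem.Set.update_nil_left,
      PySem.List.dedup_eq_ofList]
  have hitemsG : G.items = G.keys.map (fun k => (k, G.getD k [])) :=
    PySem.Dict.items_eq_map_keys G hnodG []
  simp only [List.map_map]
  rw [hitemsG, hkeysG, List.map_map]
  apply List.map_congr_left
  intro l _
  have hgl : G.getD l [] = (pairs.filter (fun p => p.1 == l)).map (fun p => p.2) := by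
    rw [hG, PySem.Dict.getD_foldl_modify_append, PySem.Dict.getD_empty, List.nil_append]
  simp only [Function.comp, hgl, PySem.Dict.items_counter, PySem.List.dedup_eq_ofList]
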